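-- pv_equiv track=rewrite | github.com/htakumi08/Atcoder-and-Algorithm | ans.py | count_black_cells
-- ===== SOURCE A (Python) =====
-- def count_black_cells(A, B, C, D):
--     def count_in_rectangle(x1, y1, x2, y2):
--         """特定の矩形範囲で黒マスの数を計算する関数"""
--         count = 0
--         for x in range(x1, x2+1):
--             for y in range(y1, y2+1):
--                 if (x + y) % 2 == 0:  # 黒マスの条件
--                     count += 1
--         return count
--
--     # 全体の黒マスを計算
--     total_black = count_in_rectangle(A, B, C, D)
--     return total_black
-- ===== SOURCE B (Python) =====
-- def count_black_cells(A, B, C, D):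
--     # closed-form parity count: number of black cells = (#even x)*(#even y) + (#odd x)*(#odd y)
--     if C < A or D < B:
--         return 0
--     ex = C // 2 - (A - 1) // 2          # even x in [A, C]
--     ox = (C - A + 1) - ex               # odd x in [A, C]
--     ey = D // 2 - (B - 1) // 2          # even y in [B, D]
--     oy = (D - B + 1) - ey               # odd y in [B, D]
--     return ex * ey + ox * oy
-- ===== Notes on version B (the rewrite author's own statement) =====
-- stated objective: alternative
-- what changed: Replaced the nested loop over all cells of the rectangle by a closed-form parity count (#even x * #even y + #odd x * #odd y via floor division).
import Mathlib
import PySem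

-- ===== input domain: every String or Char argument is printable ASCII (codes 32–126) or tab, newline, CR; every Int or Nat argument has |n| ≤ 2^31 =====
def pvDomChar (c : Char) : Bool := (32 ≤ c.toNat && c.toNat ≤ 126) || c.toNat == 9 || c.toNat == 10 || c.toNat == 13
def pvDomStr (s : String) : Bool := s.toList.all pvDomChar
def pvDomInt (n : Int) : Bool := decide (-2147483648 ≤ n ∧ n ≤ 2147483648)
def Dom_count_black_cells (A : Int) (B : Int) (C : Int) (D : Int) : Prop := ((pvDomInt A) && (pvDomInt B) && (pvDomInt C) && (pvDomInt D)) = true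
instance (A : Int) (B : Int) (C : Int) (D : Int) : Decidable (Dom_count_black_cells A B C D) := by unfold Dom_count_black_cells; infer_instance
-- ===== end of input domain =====

-- B replaces A's nested loop over the rectangle by a closed-form parity count (objective: alternative).

-- ===== PORT A =====
def count_black_cells (A : Int) (B : Int) (C : Int) (D : Int) : Int :=
  (PySem.List.pyRange A (C + 1) 1).foldl (fun count x =>
    (PySem.List.pyRange B (D + 1) 1).foldl (fun count y =>
      if PySem.Int.mod (x + y) 2 == 0 then count + 1 else count) count) 0

-- ===== PORT B =====
def count_black_cells_alt (A : Int) (B : Int) (C : Int) (D : Int) : Int :=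
  if C < A ∨ D < B then 0
  else
    let ex := PySem.Int.floordiv C 2 - PySem.Int.floordiv (A - 1) 2
    let ox := (C - A + 1) - ex
    let ey := PySem.Int.floordiv D 2 - PySem.Int.floordiv (B - 1) 2
    let oy := (D - B + 1) - ey
    ex * ey + ox * oy

-- ===== PRECONDITION & SPEC =====
def Spec_count_black_cells (A : Int) (B : Int) (C : Int) (D : Int) (out : Int) : Prop := out = count_black_cells_alt A B C D
instance (A : Int) (B : Int) (C : Int) (D : Int) (out : Int) : Decidable (Spec_count_black_cells A B C D out) := by unfold Spec_count_black_cells; infer_instance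

-- ===== CLAIM (what is proved, stated in full; the proofs are below) =====
def Claim_equal_count_black_cells : Prop := ∀ (A : Int) (B : Int) (C : Int) (D : Int), Dom_count_black_cells A B C D → Spec_count_black_cells A B C D (count_black_cells A B C D)

-- ===== LEMMAS AND PROOFS =====

-- number of even-sum cells in a strip {t} × [0, n) shifted by t: count of k < n with (t + k) even
lemma countP_even_range (t : Int) (n : Nat) :
    (((List.range n).map (fun (k : Nat) => t + (k : Int))).countP
      (fun y => PySem.Int.mod y 2 == 0) : Int) = (t + n - 1) / 2 - (t - 1) / 2 := by
  induction n with
  | zero => simp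
  | succ n ih =>
    rw [List.range_succ, List.map_append, List.countP_append]
    simp only [List.map_cons, List.map_nil, List.countP_cons, List.countP_nil]
    have hm : PySem.Int.mod (t + (n : Int)) 2 = (t + (n : Int)) % 2 :=
      PySem.Int.mod_eq_emod_of_pos (by norm_num)
    push_cast
    rw [ih]
    by_cases h : (t + (n : Int)) % 2 = 0 <;> simp [h] <;> omega


-- the inner loop: adds to the accumulator the number of even-sum cells of the row
lemma inner_fold (x B D c : Int) :
    (PySem.List.pyRange B (D + 1) 1).foldl
      (fun count y => if PySem.Int.mod (x + y) 2 == 0 then count + 1 else count) c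
    = c + ((x + B + ((D + 1 - B).toNat : Int) - 1) / 2 - (x + B - 1) / 2) := by
  rw [PySem.List.foldl_if_add_one, PySem.List.pyRange_one]
  have : ((List.range (D + 1 - B).toNat).map (fun (k : Nat) => B + (k : Int))).countP
        (fun y => PySem.Int.mod (x + y) 2 == 0)
      = ((List.range (D + 1 - B).toNat).map (fun (k : Nat) => (x + B) + (k : Int))).countP
          (fun y => PySem.Int.mod y 2 == 0) := by
    rw [List.countP_map, List.countP_map]
    apply List.countP_congr
    intro k _
    simp [Function.comp, add_assoc]
  rw [this, countP_even_range]

-- the outer loop from A over m rows equals the closed form with C := A + m - 1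
lemma outer_fold (B D : Int) (hBD : B ≤ D) (a : Int) (m : Nat) :
    ((List.range m).map (fun (k : Nat) => a + (k : Int))).foldl
      (fun count x =>
        (PySem.List.pyRange B (D + 1) 1).foldl
          (fun count y => if PySem.Int.mod (x + y) 2 == 0 then count + 1 else count) count) 0
    = ((a + m - 1) / 2 - (a - 1) / 2) * (D / 2 - (B - 1) / 2)
      + ((m : Int) - ((a + m - 1) / 2 - (a - 1) / 2)) * ((D - B + 1) - (D / 2 - (B - 1) / 2)) := by
  have hn : ((D + 1 - B).toNat : Int) = D + 1 - B := by omega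
  induction m with
  | zero => simp
  | succ m ih =>
    rw [List.range_succ, List.map_append, List.foldl_append]
    simp only [List.map_cons, List.map_nil, List.foldl_cons, List.foldl_nil]
    rw [ih, inner_fold, hn]
    by_cases h : (a + (m : Int)) % 2 = 0
    · have hex : (a + ((m : Int) + 1) - 1) / 2 - (a - 1) / 2
          = ((a + (m : Int) - 1) / 2 - (a - 1) / 2) + 1 := by push_cast; omega
      have hg : (a + (m : Int) + B + (D + 1 - B) - 1) / 2 - (a + (m : Int) + B - 1) / 2
          = D / 2 - (B - 1) / 2 := by omega
      push_cast
      rw [hex]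
      ring_nf
      ring_nf at hg
      omega
    · have hex : (a + ((m : Int) + 1) - 1) / 2 - (a - 1) / 2
          = (a + (m : Int) - 1) / 2 - (a - 1) / 2 := by push_cast; omega
      have hg : (a + (m : Int) + B + (D + 1 - B) - 1) / 2 - (a + (m : Int) + B - 1) / 2
          = (D - B + 1) - (D / 2 - (B - 1) / 2) := by omega
      push_cast
      rw [hex]
      ring_nf
      ring_nf at hg
      omega

-- ===== VERDICT (by name: the statement is the Claim_ definition above) =====
theorem count_black_cells_spec : Claim_equal_count_black_cells := by
  intro A B C D _
  unfold Spec_count_black_cells count_black_cells count_black_cells_alt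
  by_cases hC : C < A
  · have : PySem.List.pyRange A (C + 1) 1 = [] := by
      rw [PySem.List.pyRange_one]
      have : (C + 1 - A).toNat = 0 := by omega
      simp [this]
    simp [this, hC]
  · by_cases hD : D < B
    · have hin : PySem.List.pyRange B (D + 1) 1 = [] := by
        rw [PySem.List.pyRange_one]
        have : (D + 1 - B).toNat = 0 := by omega
        simp [this]
      rw [hin]
      simp only [List.foldl_nil]
      rw [PySem.List.foldl_ignore]
      simp [hD]
    · push Not at hC hD
      rw [PySem.List.pyRange_one (a := A) (b := C + 1), outer_fold B D hD]
      have hfa : PySem.Int.floordiv C 2 = C / 2 := PySem.Int.floordiv_eq_ediv_of_pos (by norm_num)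
      have hfb : PySem.Int.floordiv (A - 1) 2 = (A - 1) / 2 := PySem.Int.floordiv_eq_ediv_of_pos (by norm_num)
      have hfc : PySem.Int.floordiv D 2 = D / 2 := PySem.Int.floordiv_eq_ediv_of_pos (by norm_num)
      have hfd : PySem.Int.floordiv (B - 1) 2 = (B - 1) / 2 := PySem.Int.floordiv_eq_ediv_of_pos (by norm_num)
      have hm : ((C + 1 - A).toNat : Int) = C + 1 - A := by omega
      simp only [hfa, hfb, hfc, hfd, hm, if_neg (by omega : ¬ (C < A ∨ D < B))]
      have h2 : A + (C + 1 - A) - 1 = C := by ring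
      rw [h2]
      ring
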